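-- pv_equiv track=rewrite | github.com/rafalsiniewicz/coding_challenges | HackerRank/python/Medium/time_delta/time_delta.py | time_in_seconds
-- ===== SOURCE A (Python) =====
-- MONTHS = {'Jan': {'number': 1, 'days': 31}, 'Feb': {'number': 2, 'days': [28, 29]},
--           'Mar': {'number': 3, 'days': 31}, 'Apr': {'number': 4, 'days': 30}, 'May': {'number': 5, 'days': 31},
--           'Jun': {'number': 6, 'days': 30}, 'Jul': {'number': 7, 'days': 31}, 'Aug': {'number': 8, 'days': 31},
--           'Sep': {'number': 9, 'days': 30}, 'Oct': {'number': 10, 'days': 31},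
--           'Nov': {'number': 11, 'days': 30}, 'Dec': {'number': 12, 'days': 31}}
--
-- SECONDS_IN_MINUTE = 60
--
-- SECONDS_IN_HOUR = SECONDS_IN_MINUTE * 60
--
-- SECONDS_IN_DAY = 24 * SECONDS_IN_HOUR
--
-- SECONDS_IN_LEAP = 366 * SECONDS_IN_DAY
--
-- SECONDS_IN_NORMAL = 365 * SECONDS_IN_DAY
--
-- def _is_leap(year):
--     """
--     Check if year is leap
--     :param year:
--     :return:
--     """
--     if ((year % 400 == 0) and (year % 100 == 0)) or ((year % 4 == 0) and (year % 100 != 0)):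
--         return True
--     else:
--         return False
--
-- def get_years(year):
--     """
--     Get number of leap years and number of normal years until the year
--     :return leap_years, normal_years (int, int):
--     """
--     leap_cnt = 0
--
--     for y in range(year):
--         if _is_leap(y):
--             leap_cnt += 1
--
--     return leap_cnt, year - leap_cnt
--
-- def time_in_seconds(day, month, year, hour, minute, second, time_zone_hour, time_zone_minute):
--     """
--
--     :param day:
--     :param month:
--     :param year:
--     :param hour:
--     :param minute:
--     :param second:
--     :return time_in_seconds (int):
--     """
--     days_in_months = 0
--     for k, v in MONTHS.items():
--         if v['number'] < month:
--             if v['number'] == 2: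
--                 if _is_leap(year):
--                     days_in_months += v['days'][1]
--                 else:
--                     days_in_months += v['days'][0]
--             else:
--                 days_in_months += v['days']
--
--     leap_years, normal_years = get_years(year)
--     return day * SECONDS_IN_DAY + days_in_months * SECONDS_IN_DAY + leap_years * SECONDS_IN_LEAP + \
--            normal_years * SECONDS_IN_NORMAL + hour * SECONDS_IN_HOUR + minute * SECONDS_IN_MINUTE + \
--            second - time_zone_hour * SECONDS_IN_HOUR - time_zone_minute * SECONDS_IN_MINUTE
-- ===== SOURCE B (Python) =====
-- def time_in_seconds(day, month, year, hour, minute, second, time_zone_hour, time_zone_minute):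
--     # O(1): closed-form leap-year count via floor division; cumulative month table.
--     leap = year % 4 == 0 and (year % 100 != 0 or year % 400 == 0)
--     CUM = [0, 0, 31, 59, 90, 120, 151, 181, 212, 243, 273, 304, 334]
--     if month <= 1:
--         days = 0
--     elif month >= 13:
--         days = 365
--     else:
--         days = CUM[month]
--     if leap and month >= 3:
--         days += 1
--     if year > 0:
--         leaps = (year - 1) // 4 - (year - 1) // 100 + (year - 1) // 400 + 1
--     else:
--         leaps = 0
--     total_days = day + days + 365 * year + leaps
--     return total_days * 86400 + (hour - time_zone_hour) * 3600 + (minute - time_zone_minute) * 60 + second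
-- ===== Notes on version B (the rewrite author's own statement) =====
-- stated objective: faster
-- what changed: Replaced the per-year leap-counting loop and the per-month dict scan with a closed-form leap count via floor division and a cumulative days-before-month table.
import Mathlib
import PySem

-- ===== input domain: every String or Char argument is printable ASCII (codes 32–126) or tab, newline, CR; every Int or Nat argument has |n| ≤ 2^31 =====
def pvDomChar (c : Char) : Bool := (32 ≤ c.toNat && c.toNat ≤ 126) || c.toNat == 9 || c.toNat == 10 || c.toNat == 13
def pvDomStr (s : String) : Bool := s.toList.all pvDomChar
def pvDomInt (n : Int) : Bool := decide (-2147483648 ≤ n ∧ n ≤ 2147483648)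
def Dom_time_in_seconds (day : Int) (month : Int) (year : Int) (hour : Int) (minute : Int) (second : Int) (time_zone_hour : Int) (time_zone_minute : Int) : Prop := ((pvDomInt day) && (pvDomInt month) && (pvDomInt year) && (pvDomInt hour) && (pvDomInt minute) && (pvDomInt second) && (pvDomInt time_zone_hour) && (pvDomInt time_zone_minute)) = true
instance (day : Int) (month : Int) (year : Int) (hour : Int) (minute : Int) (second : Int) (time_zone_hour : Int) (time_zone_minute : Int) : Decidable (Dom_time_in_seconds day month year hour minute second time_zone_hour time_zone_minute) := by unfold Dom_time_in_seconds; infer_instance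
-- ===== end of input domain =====

-- B replaces A's per-year leap-counting loop and per-month dict scan with a closed-form
-- floor-division leap count and a cumulative days-before-month table (objective: faster, O(1)).

-- ===== PORT A =====
-- MONTHS entries as (name, number, days_normal, days_leap); days_leap = days_normal except Feb ([28, 29]).
def pvMONTHS : List (String × Int × Int × Int) :=
  [("Jan", 1, 31, 31), ("Feb", 2, 28, 29), ("Mar", 3, 31, 31), ("Apr", 4, 30, 30),
   ("May", 5, 31, 31), ("Jun", 6, 30, 30), ("Jul", 7, 31, 31), ("Aug", 8, 31, 31),
   ("Sep", 9, 30, 30), ("Oct", 10, 31, 31), ("Nov", 11, 30, 30), ("Dec", 12, 31, 31)]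

def pvSECONDS_IN_MINUTE : Int := 60
def pvSECONDS_IN_HOUR : Int := pvSECONDS_IN_MINUTE * 60
def pvSECONDS_IN_DAY : Int := 24 * pvSECONDS_IN_HOUR
def pvSECONDS_IN_LEAP : Int := 366 * pvSECONDS_IN_DAY
def pvSECONDS_IN_NORMAL : Int := 365 * pvSECONDS_IN_DAY

def pvIsLeap (year : Int) : Bool :=
  if ((PySem.Int.mod year 400 == 0) && (PySem.Int.mod year 100 == 0)) ||
     ((PySem.Int.mod year 4 == 0) && (PySem.Int.mod year 100 != 0)) then true else false

def pvGetYears (year : Int) : Int × Int :=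
  let leap_cnt := (PySem.List.pyRange 0 year 1).foldl
    (fun leap_cnt y => if pvIsLeap y then leap_cnt + 1 else leap_cnt) 0
  (leap_cnt, year - leap_cnt)

def time_in_seconds (day : Int) (month : Int) (year : Int) (hour : Int) (minute : Int) (second : Int) (time_zone_hour : Int) (time_zone_minute : Int) : Int :=
  let days_in_months := pvMONTHS.foldl
    (fun days_in_months kv =>
      if kv.2.1 < month then
        if kv.2.1 == 2 then
          if pvIsLeap year then days_in_months + kv.2.2.2 else days_in_months + kv.2.2.1
        else days_in_months + kv.2.2.1
      else days_in_months) 0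
  let ly := (pvGetYears year).1
  let ny := (pvGetYears year).2
  day * pvSECONDS_IN_DAY + days_in_months * pvSECONDS_IN_DAY + ly * pvSECONDS_IN_LEAP +
    ny * pvSECONDS_IN_NORMAL + hour * pvSECONDS_IN_HOUR + minute * pvSECONDS_IN_MINUTE +
    second - time_zone_hour * pvSECONDS_IN_HOUR - time_zone_minute * pvSECONDS_IN_MINUTE

-- ===== PORT B =====
def pvCUM : List Int := [0, 0, 31, 59, 90, 120, 151, 181, 212, 243, 273, 304, 334]

def time_in_seconds_alt (day : Int) (month : Int) (year : Int) (hour : Int) (minute : Int) (second : Int) (time_zone_hour : Int) (time_zone_minute : Int) : Int :=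
  let leap := (PySem.Int.mod year 4 == 0) &&
              ((PySem.Int.mod year 100 != 0) || (PySem.Int.mod year 400 == 0))
  let days0 : Int :=
    if month ≤ 1 then 0
    else if 13 ≤ month then 365
    else PySem.List.pyGetD pvCUM month 0   -- CUM[month], month ∈ [2,12] here so in range
  let days := if leap && decide (3 ≤ month) then days0 + 1 else days0
  let leaps : Int :=
    if 0 < year then
      PySem.Int.floordiv (year - 1) 4 - PySem.Int.floordiv (year - 1) 100 +
        PySem.Int.floordiv (year - 1) 400 + 1
    else 0
  let total_days := day + days + 365 * year + leaps
  total_days * 86400 + (hour - time_zone_hour) * 3600 + (minute - time_zone_minute) * 60 + second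

-- ===== PRECONDITION & SPEC =====
def Spec_time_in_seconds (day : Int) (month : Int) (year : Int) (hour : Int) (minute : Int) (second : Int) (time_zone_hour : Int) (time_zone_minute : Int) (out : Int) : Prop := out = time_in_seconds_alt day month year hour minute second time_zone_hour time_zone_minute
instance (day : Int) (month : Int) (year : Int) (hour : Int) (minute : Int) (second : Int) (time_zone_hour : Int) (time_zone_minute : Int) (out : Int) : Decidable (Spec_time_in_seconds day month year hour minute second time_zone_hour time_zone_minute out) := by unfold Spec_time_in_seconds; infer_instance

-- ===== CLAIM (what is proved, stated in full; the proofs are below) =====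
def Claim_equal_time_in_seconds : Prop := ∀ (day : Int) (month : Int) (year : Int) (hour : Int) (minute : Int) (second : Int) (time_zone_hour : Int) (time_zone_minute : Int), Dom_time_in_seconds day month year hour minute second time_zone_hour time_zone_minute → Spec_time_in_seconds day month year hour minute second time_zone_hour time_zone_minute (time_in_seconds day month year hour minute second time_zone_hour time_zone_minute)

-- ===== LEMMAS AND PROOFS =====

lemma pvIf_bool (c : Prop) [inst : Decidable c] : (if c then true else false) = decide c := by
  by_cases h : c <;> simp [h]

lemma pvIsLeap_eq_expr (y : Int) :
    pvIsLeap y = (((PySem.Int.mod y 400 == 0) && (PySem.Int.mod y 100 == 0)) ||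
      ((PySem.Int.mod y 4 == 0) && (PySem.Int.mod y 100 != 0))) := by
  unfold pvIsLeap
  rw [pvIf_bool, Bool.decide_coe]

-- B's leap test equals A's.
lemma pvLeap_eq (y : Int) :
    ((PySem.Int.mod y 4 == 0) && ((PySem.Int.mod y 100 != 0) || (PySem.Int.mod y 400 == 0)))
      = pvIsLeap y := by
  rw [pvIsLeap_eq_expr, Bool.eq_iff_iff]
  simp only [Bool.and_eq_true, Bool.or_eq_true, beq_iff_eq, bne_iff_ne, ne_eq,
    PySem.Int.mod_eq_zero_iff_dvd]
  constructor
  · rintro ⟨h4, h⟩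
    rcases h with h | h
    · exact Or.inr ⟨h4, h⟩
    · exact Or.inl ⟨h, dvd_trans (by norm_num) h⟩
  · rintro (⟨h400, h100⟩ | ⟨h4, h100⟩)
    · exact ⟨dvd_trans (by norm_num) h400, Or.inr h400⟩
    · exact ⟨h4, Or.inl h100⟩

-- Closed form for A's leap-year counting loop, positive years.
lemma pvCount_leaps (n : Nat) (h : 0 < n) :
    (PySem.List.pyRange 0 (n : Int) 1).foldl
        (fun leap_cnt y => if pvIsLeap y then leap_cnt + 1 else leap_cnt) (0 : Int)
      = PySem.Int.floordiv ((n : Int) - 1) 4 - PySem.Int.floordiv ((n : Int) - 1) 100 +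
          PySem.Int.floordiv ((n : Int) - 1) 400 + 1 := by
  induction n with
  | zero => omega
  | succ m ih =>
    rcases Nat.eq_zero_or_pos m with hm | hm
    · subst hm; decide
    · have hstep : PySem.List.pyRange 0 ((m : Int) + 1) 1
          = PySem.List.pyRange 0 (m : Int) 1 ++ [(m : Int)] :=
        PySem.List.pyRange_one_succ_right (by positivity)
      push_cast
      rw [hstep, List.foldl_append, ih hm]
      have hmm : ((m : Int) + 1 - 1) = (m : Int) := by ring
      rw [hmm]
      simp only [List.foldl_cons, List.foldl_nil, pvIsLeap_eq_expr, Bool.and_eq_true,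
        Bool.or_eq_true, beq_iff_eq, bne_iff_ne, ne_eq, PySem.Int.mod_eq_zero_iff_dvd,
        PySem.Int.floordiv_eq_ediv_of_pos (by norm_num : (0:Int) < 4),
        PySem.Int.floordiv_eq_ediv_of_pos (by norm_num : (0:Int) < 100),
        PySem.Int.floordiv_eq_ediv_of_pos (by norm_num : (0:Int) < 400)]
      split_ifs with hc <;> omega

-- A's month fold equals B's table-plus-adjustment, for either value of the leap flag.
lemma pvMonths_eq (month : Int) (L : Bool) :
    (pvMONTHS.foldl
      (fun days_in_months kv =>
        if kv.2.1 < month then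
          if kv.2.1 == 2 then
            if L then days_in_months + kv.2.2.2 else days_in_months + kv.2.2.1
          else days_in_months + kv.2.2.1
        else days_in_months) 0)
    = (if L && decide (3 ≤ month) then
         (if month ≤ 1 then 0 else if 13 ≤ month then 365 else PySem.List.pyGetD pvCUM month 0) + 1
       else
         (if month ≤ 1 then 0 else if 13 ≤ month then 365 else PySem.List.pyGetD pvCUM month 0)) := by
  have hf : (fun (days_in_months : Int) (kv : String × Int × Int × Int) =>
        if kv.2.1 < month then
          if kv.2.1 == 2 then
            if L then days_in_months + kv.2.2.2 else days_in_months + kv.2.2.1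
          else days_in_months + kv.2.2.1
        else days_in_months)
      = (fun days_in_months kv => days_in_months +
          (if kv.2.1 < month then
            if kv.2.1 == 2 then (if L then kv.2.2.2 else kv.2.2.1) else kv.2.2.1
           else 0)) := by
    funext a kv; split_ifs <;> ring
  rw [hf, PySem.List.foldl_add]
  rcases (by omega : month ≤ 1 ∨ 13 ≤ month ∨ (2 ≤ month ∧ month ≤ 12)) with h1 | h13 | ⟨h2, h12⟩
  · simp only [pvMONTHS, List.map_cons, List.map_nil, List.sum_cons, List.sum_nil]
    simp [show ¬((1:Int) < month) by omega, show ¬((2:Int) < month) by omega,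
      show ¬((3:Int) < month) by omega, show ¬((4:Int) < month) by omega,
      show ¬((5:Int) < month) by omega, show ¬((6:Int) < month) by omega,
      show ¬((7:Int) < month) by omega, show ¬((8:Int) < month) by omega,
      show ¬((9:Int) < month) by omega, show ¬((10:Int) < month) by omega,
      show ¬((11:Int) < month) by omega, show ¬((12:Int) < month) by omega,
      show ¬((3:Int) ≤ month) by omega, h1]
  · simp only [pvMONTHS, List.map_cons, List.map_nil, List.sum_cons, List.sum_nil]
    simp [show ((1:Int) < month) by omega, show ((2:Int) < month) by omega,
      show ((3:Int) < month) by omega, show ((4:Int) < month) by omega,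
      show ((5:Int) < month) by omega, show ((6:Int) < month) by omega,
      show ((7:Int) < month) by omega, show ((8:Int) < month) by omega,
      show ((9:Int) < month) by omega, show ((10:Int) < month) by omega,
      show ((11:Int) < month) by omega, show ((12:Int) < month) by omega,
      show ((3:Int) ≤ month) by omega, show ¬(month ≤ 1) by omega, h13]
    cases L <;> norm_num
  · interval_cases month <;> cases L <;> decide

-- ===== VERDICT (by name: the statement is the Claim_ definition above) =====
theorem time_in_seconds_spec : Claim_equal_time_in_seconds := by
  intro day month year hour minute second tzh tzm _
  unfold Spec_time_in_seconds time_in_seconds time_in_seconds_alt pvGetYears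
  simp only [pvLeap_eq, pvSECONDS_IN_MINUTE, pvSECONDS_IN_HOUR, pvSECONDS_IN_DAY,
    pvSECONDS_IN_LEAP, pvSECONDS_IN_NORMAL]
  rw [pvMonths_eq month (pvIsLeap year)]
  rcases (by omega : year ≤ 0 ∨ 0 < year) with hy | hy
  · rw [PySem.List.pyRange_one_eq_nil hy]
    simp only [List.foldl_nil, if_neg (by omega : ¬ 0 < year)]
    ring
  · have hy' : year = ((year.toNat : Int)) := by omega
    rw [hy', pvCount_leaps year.toNat (by omega), if_pos (by omega : (0:Int) < (year.toNat : Int))]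
    ring
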